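-- pv_equiv track=rewrite | github.com/vaudaine/Temporal_network_compression_via_network_hashing | utils.py | SI_process_parallel_enumeration
-- ===== SOURCE A (Python) =====
-- def SI_process_parallel_enumeration(events, link_table, output_dimension):
--     """ Uses sets instead of matrix representation"""
--     out_comp_node = dict()
--     outsize_node = [0 for i in range(output_dimension)]
--     for i in range(output_dimension):
--         out_comp_node[i] = set()
--         out_comp_node[i].add(i)
--     for event in events:
--         i, j, t = event
--         if i == j:
--             continue
--         i, j = link_table[i], link_table[j]
--
--         a = out_comp_node[i]
--         b = out_comp_node[j]
--         c = a.union(b)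
--
--         out_comp_node[i] = c
--         out_comp_node[j] = c
--     for i in range(output_dimension):
--         for j in out_comp_node[i]:
--             outsize_node[j] += 1
--
--     return outsize_node
-- ===== SOURCE B (Python) =====
-- def SI_process_parallel_enumeration(events, link_table, output_dimension):
--     """Time-reversal duality: instead of A's backward 'infected-by' sets (row i =
--     sources that reach i) followed by a column-count pass, sweep the events in
--     REVERSE order maintaining each node's forward reachability set directly;
--     the answer is then simply the size of each node's own set."""
--     reach = [{i} for i in range(output_dimension)]
--     for i, j, t in reversed(events):
--         if i == j:
--             continue
--         a, b = link_table[i], link_table[j]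
--         r = reach[a] | reach[b]
--         reach[a] = r
--         reach[b] = r
--     return [len(r) for r in reach]
-- ===== Notes on version B (the rewrite author's own statement) =====
-- stated objective: alternative
-- what changed: A sweeps events forward maintaining for each node the set of sources that reach it and then counts, for every source j, in how many rows j occurs (a column-count double loop); B exploits time-reversal duality: it sweeps the events in reverse order maintaining each node's forward reachability set directly (in a plain list, not a dict), so the answer is just the length of each node's own set with no counting pass.
import Mathlib
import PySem

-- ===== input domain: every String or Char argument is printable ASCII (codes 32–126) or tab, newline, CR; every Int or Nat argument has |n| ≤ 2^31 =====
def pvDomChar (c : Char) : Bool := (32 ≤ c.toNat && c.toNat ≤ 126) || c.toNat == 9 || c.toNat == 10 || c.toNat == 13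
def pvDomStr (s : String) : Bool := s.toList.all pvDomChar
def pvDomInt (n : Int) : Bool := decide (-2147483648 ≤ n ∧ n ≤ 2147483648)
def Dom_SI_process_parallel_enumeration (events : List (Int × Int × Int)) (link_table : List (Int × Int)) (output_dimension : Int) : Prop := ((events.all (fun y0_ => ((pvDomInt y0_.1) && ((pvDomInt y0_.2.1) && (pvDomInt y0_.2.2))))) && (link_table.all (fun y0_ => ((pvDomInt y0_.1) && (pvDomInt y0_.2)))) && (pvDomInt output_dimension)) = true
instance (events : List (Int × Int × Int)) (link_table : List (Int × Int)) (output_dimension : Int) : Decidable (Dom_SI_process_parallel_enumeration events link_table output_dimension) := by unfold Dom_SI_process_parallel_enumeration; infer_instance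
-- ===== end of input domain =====

-- B replaces A's forward sweep over per-node "infected-by" sets plus a final
-- column-count double loop by the time-reversed sweep: it processes the events in
-- REVERSE order maintaining each node's forward reachability set in a plain list,
-- and the answer is the length of each node's own set; objective: alternative.

-- ===== PORT A =====
-- out_comp_node[i] = set(); out_comp_node[i].add(i)  (the add reads the just-inserted empty set)
def piA_init (output_dimension : Int) : PySem.Dict Int (PySem.Set Int) :=
  (PySem.List.pyRange 0 output_dimension 1).foldl
    (fun dct i => dct.insert i (PySem.Set.add PySem.Set.empty i)) PySem.Dict.empty

-- one event of A's loop; `none` = the KeyError Python would raise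
def piA_step (lt : PySem.Dict Int Int) (st : Option (PySem.Dict Int (PySem.Set Int)))
    (ev : Int × Int × Int) : Option (PySem.Dict Int (PySem.Set Int)) :=
  st.bind fun dct =>
    if ev.1 == ev.2.1 then some dct else
    match lt.get? ev.1, lt.get? ev.2.1 with
    | some i, some j =>
      match dct.get? i, dct.get? j with
      | some a, some b =>
        let c := PySem.Set.union a b
        some ((dct.insert i c).insert j c)
      | _, _ => none
    | _, _ => none

-- the final double loop: outsize_node[j] += 1 for every j in out_comp_node[i]
def piA_count (output_dimension : Int) (dct : PySem.Dict Int (PySem.Set Int))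
    (os0 : List Int) : Option (List Int) :=
  (PySem.List.pyRange 0 output_dimension 1).foldl
    (fun st i => st.bind fun os =>
      match dct.get? i with
      | none => none
      | some s =>
        s.foldl (fun st2 j => st2.bind fun os2 =>
          (PySem.List.pyGet? os2 j).bind fun v => PySem.List.pySet? os2 j (v + 1)) (some os))
    (some os0)

def SI_process_parallel_enumeration (events : List (Int × Int × Int)) (link_table : List (Int × Int)) (output_dimension : Int) : List Int :=
  let lt := PySem.Dict.ofList link_table
  let os0 : List Int := (PySem.List.pyRange 0 output_dimension 1).map (fun _ => 0)
  match events.foldl (piA_step lt) (some (piA_init output_dimension)) with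
  | none => []
  | some dct => (piA_count output_dimension dct os0).getD []

-- ===== PORT B =====
-- one event of B's reverse loop over the list `reach`; `none` = the KeyError/IndexError
-- Python would raise
def piB_step (lt : PySem.Dict Int Int) (st : Option (List (PySem.Set Int)))
    (ev : Int × Int × Int) : Option (List (PySem.Set Int)) :=
  st.bind fun rs =>
    if ev.1 == ev.2.1 then some rs else
    match lt.get? ev.1, lt.get? ev.2.1 with
    | some a, some b =>
      match PySem.List.pyGet? rs a, PySem.List.pyGet? rs b with
      | some ra, some rb =>
        let r := PySem.Set.union ra rb
        (PySem.List.pySet? rs a r).bind fun rs1 => PySem.List.pySet? rs1 b r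
      | _, _ => none
    | _, _ => none

def SI_process_parallel_enumeration_alt (events : List (Int × Int × Int)) (link_table : List (Int × Int)) (output_dimension : Int) : List Int :=
  let lt := PySem.Dict.ofList link_table
  -- reach = [{i} for i in range(output_dimension)]
  let reach0 : List (PySem.Set Int) :=
    (PySem.List.pyRange 0 output_dimension 1).map (fun i => PySem.Set.add PySem.Set.empty i)
  match events.reverse.foldl (piB_step lt) (some reach0) with
  | none => []
  | some rs => rs.map (fun r => PySem.Set.len r)

-- ===== PRECONDITION & SPEC =====
-- Pre_: every event with i ≠ j must find both endpoints in link_table with remapped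
-- values in [0, output_dimension); exactly elsewhere Python A raises KeyError.
def Pre_SI_process_parallel_enumeration (events : List (Int × Int × Int)) (link_table : List (Int × Int)) (output_dimension : Int) : Prop :=
  (events.all (fun e => e.1 == e.2.1 ||
    (((PySem.Dict.ofList link_table).get? e.1).elim false
        (fun a => decide (0 ≤ a ∧ a < output_dimension)) &&
     ((PySem.Dict.ofList link_table).get? e.2.1).elim false
        (fun b => decide (0 ≤ b ∧ b < output_dimension))))) = true
instance (events : List (Int × Int × Int)) (link_table : List (Int × Int)) (output_dimension : Int) : Decidable (Pre_SI_process_parallel_enumeration events link_table output_dimension) := by unfold Pre_SI_process_parallel_enumeration; infer_instance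

def pvWitness_SI_process_parallel_enumeration : (List (Int × Int × Int)) × (List (Int × Int)) × Int :=
  ([(0, 1, 5), (1, 2, 6)], [(0, 0), (1, 1), (2, 1)], 2)

def Spec_SI_process_parallel_enumeration (events : List (Int × Int × Int)) (link_table : List (Int × Int)) (output_dimension : Int) (out : List Int) : Prop := out = SI_process_parallel_enumeration_alt events link_table output_dimension
instance (events : List (Int × Int × Int)) (link_table : List (Int × Int)) (output_dimension : Int) (out : List Int) : Decidable (Spec_SI_process_parallel_enumeration events link_table output_dimension out) := by unfold Spec_SI_process_parallel_enumeration; infer_instance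

-- ===== CLAIM (what is proved, stated in full; the proofs are below) =====
def Claim_equal_SI_process_parallel_enumeration : Prop := ∀ (events : List (Int × Int × Int)) (link_table : List (Int × Int)) (output_dimension : Int), Dom_SI_process_parallel_enumeration events link_table output_dimension → Pre_SI_process_parallel_enumeration events link_table output_dimension → Spec_SI_process_parallel_enumeration events link_table output_dimension (SI_process_parallel_enumeration events link_table output_dimension)

-- ===== LEMMAS AND PROOFS =====

-- The time-respecting reachability relation both programs compute:
-- RR lt es j i  ⟺  "starting at (remapped) node j before the events es, one can reach i".
def piRR (lt : PySem.Dict Int Int) : List (Int × Int × Int) → Int → Int → Prop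
  | [], j, i => j = i
  | e :: es, j, i =>
    if e.1 = e.2.1 then piRR lt es j i
    else
      match lt.get? e.1, lt.get? e.2.1 with
      | some a, some b =>
        if j = a ∨ j = b then (piRR lt es a i ∨ piRR lt es b i) else piRR lt es j i
      | _, _ => piRR lt es j i

-- ---- generic helpers --------------------------------------------------------

theorem set_getElemBang {α : Type} [Inhabited α] {l : List α} {i k : Nat} (v : α) (hk : k < l.length) :
    (l.set i v)[k]! = if i = k then v else l[k]! := by
  rw [List.getElem!_eq_getElem?_getD, List.getElem!_eq_getElem?_getD, List.getElem?_set]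
  split_ifs with h h2
  · subst h; simp
  · subst h; omega
  · rfl

-- counting the members of a Nodup list inside range(d) gives its length
theorem count_mem_pyRange (l : List Int) (d : Int) (hnd : l.Nodup)
    (hb : ∀ x ∈ l, 0 ≤ x ∧ x < d) :
    (PySem.List.pyRange 0 d 1).countP (fun i => decide (i ∈ l)) = l.length := by
  rw [List.countP_eq_length_filter]
  have hperm : List.Perm ((PySem.List.pyRange 0 d 1).filter (fun i => decide (i ∈ l))) l := by
    rw [List.perm_ext_iff_of_nodup ((PySem.List.nodup_pyRange_one 0 d).filter _) hnd]
    intro a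
    simp only [List.mem_filter, decide_eq_true_eq, PySem.List.mem_pyRange_one]
    constructor
    · exact fun h => h.2
    · intro h; exact ⟨hb a h, h⟩
  exact hperm.length_eq

-- ---- A-side initial dict ----------------------------------------------------

theorem piA_init_items (d : Int) : (piA_init d).items =
    (PySem.List.pyRange 0 d 1).map (fun i => (i, PySem.Set.add PySem.Set.empty i)) := by
  unfold piA_init
  rw [PySem.Dict.items_foldl_insert_fresh (k := fun a => a) (v := fun a => PySem.Set.add PySem.Set.empty a)]
  · simp [PySem.Dict.empty]
  · simp [PySem.Dict.contains_empty]
  · simpa using PySem.List.nodup_pyRange_one 0 d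

theorem piA_init_keys (d : Int) : (piA_init d).keys = PySem.List.pyRange 0 d 1 := by
  simp only [PySem.Dict.keys, piA_init_items]; simp [Function.comp_def]

theorem piA_init_getD (d : Int) (i : Int) :
    (piA_init d).getD i [] = if 0 ≤ i ∧ i < d then [i] else [] := by
  split_ifs with hi
  · have hmem : (i, PySem.Set.add PySem.Set.empty i) ∈ (piA_init d).items := by
      rw [piA_init_items]
      refine List.mem_map.mpr ⟨i, ?_, rfl⟩
      rw [PySem.List.mem_pyRange_one]; exact hi
    have := PySem.Dict.getD_of_mem_items (d := piA_init d) (d0 := []) hmem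
      (by rw [piA_init_keys]; exact PySem.List.nodup_pyRange_one 0 d)
    simpa [PySem.Set.add, PySem.Set.empty] using this
  · apply PySem.Dict.getD_of_not_contains
    rw [← Bool.not_eq_true, PySem.Dict.contains_iff_mem_keys, piA_init_keys,
        PySem.List.mem_pyRange_one]
    exact hi

-- ---- A-side forward characterization ---------------------------------------

theorem foldA_char (lt : PySem.Dict Int Int) (d : Int) (es : List (Int × Int × Int))
    (D : PySem.Dict Int (PySem.Set Int))
    (hk : D.keys = PySem.List.pyRange 0 d 1)
    (hprop : ∀ i : Int, (D.getD i []).Nodup ∧ (∀ x ∈ D.getD i [], 0 ≤ x ∧ x < d) ∧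
       (¬ (0 ≤ i ∧ i < d) → D.getD i [] = []))
    (hpre : ∀ ev ∈ es, ev.1 = ev.2.1 ∨ ∃ a b : Int, lt.get? ev.1 = some a ∧
       lt.get? ev.2.1 = some b ∧ 0 ≤ a ∧ a < d ∧ 0 ≤ b ∧ b < d) :
    ∃ D', es.foldl (piA_step lt) (some D) = some D' ∧
      D'.keys = PySem.List.pyRange 0 d 1 ∧
      (∀ i : Int, (D'.getD i []).Nodup) ∧
      (∀ i x : Int, x ∈ D'.getD i [] ↔ ∃ j : Int, piRR lt es j i ∧ x ∈ D.getD j []) := by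
  induction es generalizing D with
  | nil =>
    refine ⟨D, rfl, hk, fun i => (hprop i).1, fun i x => ?_⟩
    simp only [piRR]
    constructor
    · exact fun h => ⟨i, rfl, h⟩
    · rintro ⟨j, rfl, h⟩; exact h
  | cons e es ih =>
    by_cases he : e.1 = e.2.1
    · -- skipped event
      have hstep : piA_step lt (some D) e = some D := by
        simp [piA_step, he]
      obtain ⟨D', hf, h1, h2, h3⟩ := ih D hk hprop (fun ev hev => hpre ev (by simp [hev]))
      refine ⟨D', by rw [List.foldl_cons, hstep]; exact hf, h1, h2, fun i x => ?_⟩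
      rw [h3 i x]
      simp only [piRR, if_pos he]
    · -- merging event
      obtain ⟨a, b, hga, hgb, ha0, had, hb0, hbd⟩ := (hpre e (by simp)).resolve_left he
      have hcontains : ∀ x : Int, 0 ≤ x → x < d → D.contains x = true := by
        intro x h0 h1
        rw [PySem.Dict.contains_iff_mem_keys, hk, PySem.List.mem_pyRange_one]
        exact ⟨h0, h1⟩
      have hget : ∀ x : Int, 0 ≤ x → x < d → D.get? x = some (D.getD x []) := by
        intro x h0 h1
        cases hx : D.get? x with
        | none =>
          rw [PySem.Dict.get?_eq_none_iff_contains] at hx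
          exact absurd (hcontains x h0 h1) (by simp [hx])
        | some s => exact (congrArg some (PySem.Dict.getD_of_get?_eq_some _ _ hx)).symm
      set c := PySem.Set.union (D.getD a []) (D.getD b []) with hc
      set D1 := (D.insert a c).insert b c with hD1
      have hstep : piA_step lt (some D) e = some D1 := by
        simp only [piA_step, Option.bind_some]
        rw [if_neg (by simpa using he)]
        simp only [hga, hgb, hget a ha0 had, hget b hb0 hbd]
        rfl
      have hD1getD : ∀ i : Int, D1.getD i [] =
          if i = a ∨ i = b then c else D.getD i [] := by
        intro i
        rw [hD1, PySem.Dict.getD_insert, PySem.Dict.getD_insert]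
        by_cases h1 : i = b
        · simp [h1]
        · by_cases h2 : i = a <;> simp [h1, h2]
      have hk1 : D1.keys = PySem.List.pyRange 0 d 1 := by
        have hcb : (D.insert a c).contains b = true := by
          rw [PySem.Dict.contains_insert]
          simp [hcontains b hb0 hbd]
        rw [hD1, PySem.Dict.keys_insert_of_contains _ _ hcb,
            PySem.Dict.keys_insert_of_contains _ _ (hcontains a ha0 had), hk]
      have hprop1 : ∀ i : Int, (D1.getD i []).Nodup ∧ (∀ x ∈ D1.getD i [], 0 ≤ x ∧ x < d) ∧
          (¬ (0 ≤ i ∧ i < d) → D1.getD i [] = []) := by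
        intro i
        rw [hD1getD i]
        by_cases hi : i = a ∨ i = b
        · rw [if_pos hi]
          refine ⟨PySem.Set.nodup_union _ _ (hprop a).1, ?_, ?_⟩
          · intro x hx
            rcases (PySem.Set.mem_union _ _ _).mp hx with h | h
            · exact (hprop a).2.1 x h
            · exact (hprop b).2.1 x h
          · intro hir
            exact absurd (by rcases hi with rfl | rfl; exacts [⟨ha0, had⟩, ⟨hb0, hbd⟩]) hir
        · rw [if_neg hi]; exact hprop i
      obtain ⟨D', hf, h1, h2, h3⟩ := ih D1 hk1 hprop1 (fun ev hev => hpre ev (by simp [hev]))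
      refine ⟨D', by rw [List.foldl_cons, hstep]; exact hf, h1, h2, fun i x => ?_⟩
      rw [h3 i x]
      have hRR : ∀ j : Int, piRR lt (e :: es) j i =
          if j = a ∨ j = b then (piRR lt es a i ∨ piRR lt es b i) else piRR lt es j i := by
        intro j
        simp only [piRR, if_neg he, hga, hgb]
      have hcmem : ∀ x : Int, x ∈ c ↔ (x ∈ D.getD a [] ∨ x ∈ D.getD b []) := by
        intro x; rw [hc, PySem.Set.mem_union]
      constructor
      · rintro ⟨j', hj', hx⟩
        rw [hD1getD j'] at hx
        by_cases hj : j' = a ∨ j' = b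
        · rw [if_pos hj] at hx
          rcases (hcmem x).mp hx with hxa | hxb
          · refine ⟨a, ?_, hxa⟩
            rw [hRR a, if_pos (Or.inl rfl)]
            rcases hj with rfl | rfl
            · exact Or.inl hj'
            · exact Or.inr hj'
          · refine ⟨b, ?_, hxb⟩
            rw [hRR b, if_pos (Or.inr rfl)]
            rcases hj with rfl | rfl
            · exact Or.inl hj'
            · exact Or.inr hj'
        · rw [if_neg hj] at hx
          exact ⟨j', by rw [hRR j', if_neg hj]; exact hj', hx⟩
      · rintro ⟨j, hj, hx⟩
        rw [hRR j] at hj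
        by_cases hjab : j = a ∨ j = b
        · rw [if_pos hjab] at hj
          have hxc : x ∈ c := (hcmem x).mpr (by rcases hjab with rfl | rfl; exacts [Or.inl hx, Or.inr hx])
          rcases hj with hja | hjb
          · exact ⟨a, hja, by rw [hD1getD a, if_pos (Or.inl rfl)]; exact hxc⟩
          · exact ⟨b, hjb, by rw [hD1getD b, if_pos (Or.inr rfl)]; exact hxc⟩
        · rw [if_neg hjab] at hj
          exact ⟨j, hj, by rw [hD1getD j, if_neg hjab]; exact hx⟩

-- ---- B-side reverse characterization ---------------------------------------

theorem foldB_char (lt : PySem.Dict Int Int) (d : Int) (es : List (Int × Int × Int))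
    (hpre : ∀ ev ∈ es, ev.1 = ev.2.1 ∨ ∃ a b : Int, lt.get? ev.1 = some a ∧
       lt.get? ev.2.1 = some b ∧ 0 ≤ a ∧ a < d ∧ 0 ≤ b ∧ b < d) :
    ∃ rs : List (PySem.Set Int),
      es.reverse.foldl (piB_step lt)
        (some ((PySem.List.pyRange 0 d 1).map (fun i => PySem.Set.add PySem.Set.empty i))) = some rs ∧
      rs.length = d.toNat ∧
      ∀ k : Nat, k < rs.length → (rs[k]!).Nodup ∧ (∀ x ∈ rs[k]!, 0 ≤ x ∧ x < d) ∧
        (∀ i : Int, i ∈ rs[k]! ↔ piRR lt es (k : Int) i) := by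
  induction es with
  | nil =>
    refine ⟨_, rfl, by simp [PySem.List.length_pyRange_one], fun k hk => ?_⟩
    simp only [List.length_map, PySem.List.length_pyRange_one] at hk
    have hkd : k < d.toNat := by omega
    have hget : ((PySem.List.pyRange 0 d 1).map (fun i => PySem.Set.add PySem.Set.empty i))[k]!
        = [(k : Int)] := by
      rw [PySem.List.pyRange_one]
      simp [hkd, PySem.Set.add, PySem.Set.empty]
    rw [hget]
    refine ⟨List.nodup_singleton _, ?_, fun i => ?_⟩
    · intro x hx
      simp only [List.mem_singleton] at hx
      subst hx
      constructor
      · positivity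
      · omega
    · simp only [List.mem_singleton, piRR]
      exact ⟨fun h => h.symm, fun h => h.symm⟩
  | cons e es ih =>
    obtain ⟨rs, hf, hlen, hmem⟩ := ih (fun ev hev => hpre ev (by simp [hev]))
    have hsplit : (e :: es).reverse.foldl (piB_step lt)
        (some ((PySem.List.pyRange 0 d 1).map (fun i => PySem.Set.add PySem.Set.empty i)))
        = piB_step lt (some rs) e := by
      rw [List.reverse_cons, List.foldl_append, hf]
      rfl
    by_cases he : e.1 = e.2.1
    · refine ⟨rs, by rw [hsplit]; simp [piB_step, he], hlen, fun k hk => ?_⟩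
      obtain ⟨h1, h2, h3⟩ := hmem k hk
      refine ⟨h1, h2, fun i => ?_⟩
      rw [h3 i]
      simp only [piRR, if_pos he]
    · obtain ⟨a, b, hga, hgb, ha0, had, hb0, hbd⟩ := (hpre e (by simp)).resolve_left he
      have hka : a.toNat < rs.length := by omega
      have hkb : b.toNat < rs.length := by omega
      have hacast : ((a.toNat : Int)) = a := Int.toNat_of_nonneg ha0
      have hbcast : ((b.toNat : Int)) = b := Int.toNat_of_nonneg hb0
      set r := PySem.Set.union rs[a.toNat]! rs[b.toNat]! with hr
      set rs' := (rs.set a.toNat r).set b.toNat r with hrs'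
      have hpgA : PySem.List.pyGet? rs a = some rs[a.toNat]! := by
        have h1 := PySem.List.pyGet?_natCast rs a.toNat
        rw [hacast] at h1
        rw [h1, List.getElem?_eq_getElem hka]
        simp [List.getElem!_eq_getElem?_getD, List.getElem?_eq_getElem hka]
      have hpgB : PySem.List.pyGet? rs b = some rs[b.toNat]! := by
        have h1 := PySem.List.pyGet?_natCast rs b.toNat
        rw [hbcast] at h1
        rw [h1, List.getElem?_eq_getElem hkb]
        simp [List.getElem!_eq_getElem?_getD, List.getElem?_eq_getElem hkb]
      have hps1 : PySem.List.pySet? rs a r = some (rs.set a.toNat r) := by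
        have h1 := PySem.List.pySet?_natCast rs a.toNat r hka
        rwa [hacast] at h1
      have hps2 : PySem.List.pySet? (rs.set a.toNat r) b r = some rs' := by
        have h1 := PySem.List.pySet?_natCast (rs.set a.toNat r) b.toNat r (by simpa using hkb)
        rw [hbcast] at h1
        rw [h1, hrs']
      have hstep : piB_step lt (some rs) e = some rs' := by
        simp only [piB_step, Option.bind_some]
        rw [if_neg (by simpa using he)]
        simp only [hga, hgb, hpgA, hpgB, ← hr, hps1, Option.bind_some, hps2]
      refine ⟨rs', by rw [hsplit]; exact hstep, by rw [hrs']; simpa using hlen, fun k hk => ?_⟩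
      have hk' : k < rs.length := by
        rw [hrs'] at hk; simpa using hk
      have hget' : rs'[k]! = if (k : Int) = b ∨ (k : Int) = a then r else rs[k]! := by
        rw [hrs', set_getElemBang r (by simpa using hk'), set_getElemBang r hk']
        by_cases h1 : (k : Int) = b
        · have hb' : b.toNat = k := by omega
          simp [hb', h1]
        · have hb' : ¬ b.toNat = k := by omega
          by_cases h2 : (k : Int) = a
          · have ha' : a.toNat = k := by omega
            simp [hb', ha', h2]
          · have ha' : ¬ a.toNat = k := by omega
            simp [hb', ha', h1, h2]
      obtain ⟨hnda, hbda, hrra⟩ := hmem a.toNat hka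
      obtain ⟨hndb, hbdb, hrrb⟩ := hmem b.toNat hkb
      rw [hacast] at hrra
      rw [hbcast] at hrrb
      have hRR : ∀ i : Int, piRR lt (e :: es) (k : Int) i =
          if (k : Int) = a ∨ (k : Int) = b then (piRR lt es a i ∨ piRR lt es b i)
          else piRR lt es (k : Int) i := by
        intro i
        simp only [piRR, if_neg he, hga, hgb]
      have hrmem : ∀ i : Int, i ∈ r ↔ (i ∈ rs[a.toNat]! ∨ i ∈ rs[b.toNat]!) := by
        intro i; rw [hr, PySem.Set.mem_union]
      rw [hget']
      by_cases hab : (k : Int) = b ∨ (k : Int) = a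
      · rw [if_pos hab]
        refine ⟨PySem.Set.nodup_union _ _ hnda, ?_, fun i => ?_⟩
        · intro x hx
          rcases (hrmem x).mp hx with h | h
          · exact hbda x h
          · exact hbdb x h
        · rw [hrmem i, hrra i, hrrb i, hRR i, if_pos hab.symm]
      · rw [if_neg hab]
        obtain ⟨h1, h2, h3⟩ := hmem k hk'
        refine ⟨h1, h2, fun i => ?_⟩
        rw [h3 i, hRR i, if_neg (fun h => hab h.symm)]

-- ---- A-side counting loop ---------------------------------------------------

theorem innerA (s : List Int) (os : List Int)
    (hb : ∀ x ∈ s, 0 ≤ x ∧ x.toNat < os.length) :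
    ∃ os', s.foldl (fun st2 j => st2.bind fun os2 =>
        (PySem.List.pyGet? os2 j).bind fun v => PySem.List.pySet? os2 j (v + 1)) (some os) = some os'
      ∧ os'.length = os.length
      ∧ ∀ p : Nat, p < os.length → os'[p]! = os[p]! + (s.count (p : Int) : Int) := by
  induction s generalizing os with
  | nil => exact ⟨os, rfl, rfl, fun p _ => by simp⟩
  | cons x s ih =>
    obtain ⟨hx0, hxl⟩ := hb x (by simp)
    have hxc : ((x.toNat : Int)) = x := Int.toNat_of_nonneg hx0
    have hget : PySem.List.pyGet? os x = some os[x.toNat]! := by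
      have h1 := PySem.List.pyGet?_natCast os x.toNat
      rw [hxc] at h1
      rw [h1, List.getElem?_eq_getElem hxl]
      simp [List.getElem!_eq_getElem?_getD, List.getElem?_eq_getElem hxl]
    have hset : PySem.List.pySet? os x (os[x.toNat]! + 1) =
        some (os.set x.toNat (os[x.toNat]! + 1)) := by
      have h1 := PySem.List.pySet?_natCast os x.toNat (os[x.toNat]! + 1) hxl
      rwa [hxc] at h1
    obtain ⟨os', hfold, hlen, hp⟩ := ih (os.set x.toNat (os[x.toNat]! + 1))
      (by intro y hy; have := hb y (by simp [hy]); simpa using this)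
    refine ⟨os', ?_, by simpa using hlen, ?_⟩
    · rw [List.foldl_cons]
      simp only [Option.bind_some, hget, hset]
      exact hfold
    · intro p hpl
      have := hp p (by simpa using hpl)
      rw [this]
      rw [set_getElemBang (os[x.toNat]! + 1) hpl, List.count_cons]
      by_cases hxp : x = (p : Int)
      · have : x.toNat = p := by omega
        simp [hxp]
        omega
      · have : ¬ x.toNat = p := by omega
        simp [this, hxp]

theorem outerA (dct : PySem.Dict Int (PySem.Set Int)) (is : List Int) (os : List Int)
    (h : ∀ i ∈ is, ∃ s, dct.get? i = some s ∧ s.Nodup ∧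
      (∀ x ∈ s, 0 ≤ x ∧ x.toNat < os.length)) :
    ∃ os', is.foldl (fun st i => st.bind fun os =>
        match dct.get? i with
        | none => none
        | some s =>
          s.foldl (fun st2 j => st2.bind fun os2 =>
            (PySem.List.pyGet? os2 j).bind fun v => PySem.List.pySet? os2 j (v + 1)) (some os))
        (some os) = some os'
      ∧ os'.length = os.length
      ∧ ∀ p : Nat, p < os.length →
          os'[p]! = os[p]! + (is.countP (fun i => decide ((p : Int) ∈ dct.getD i [])) : Int) := by
  induction is generalizing os with
  | nil => exact ⟨os, rfl, rfl, fun p _ => by simp⟩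
  | cons i is ih =>
    obtain ⟨s, hgs, hnd, hbs⟩ := h i (by simp)
    obtain ⟨os1, hf1, hl1, hp1⟩ := innerA s os hbs
    obtain ⟨os', hf2, hl2, hp2⟩ := ih os1
      (by intro i' hi'
          obtain ⟨s', a1, a2, a3⟩ := h i' (by simp [hi'])
          exact ⟨s', a1, a2, fun x hx => by have := a3 x hx; omega⟩)
    refine ⟨os', ?_, by omega, ?_⟩
    · rw [List.foldl_cons]
      simp only [Option.bind_some, hgs, hf1]
      exact hf2
    · intro p hpl
      rw [hp2 p (by omega), hp1 p hpl, List.countP_cons]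
      have hgd : dct.getD i [] = s := PySem.Dict.getD_of_get?_eq_some _ _ hgs
      rw [hgd]
      by_cases hm : (p : Int) ∈ s
      · rw [List.count_eq_one_of_mem hnd hm]
        simp [hm]
        omega
      · rw [List.count_eq_zero_of_not_mem hm]
        simp [hm]

-- ===== VERDICT (by name: the statement is the Claim_ definition above) =====
theorem SI_process_parallel_enumeration_spec : Claim_equal_SI_process_parallel_enumeration := by
  intro events link_table d _hdom hpre
  unfold Spec_SI_process_parallel_enumeration
  unfold SI_process_parallel_enumeration SI_process_parallel_enumeration_alt
  set lt := PySem.Dict.ofList link_table with hlt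
  have hpre' : ∀ ev ∈ events, ev.1 = ev.2.1 ∨ ∃ a b : Int,
      lt.get? ev.1 = some a ∧ lt.get? ev.2.1 = some b ∧
      0 ≤ a ∧ a < d ∧ 0 ≤ b ∧ b < d := by
    intro ev hev
    unfold Pre_SI_process_parallel_enumeration at hpre
    rw [List.all_eq_true] at hpre
    have := hpre ev hev
    by_cases hne : ev.1 = ev.2.1
    · exact Or.inl hne
    cases hga : lt.get? ev.1 with
    | none => rw [← hlt] at this; simp [hga, hne] at this
    | some a =>
      cases hgb : lt.get? ev.2.1 with
      | none => rw [← hlt] at this; simp [hga, hgb, hne] at this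
      | some b =>
        rw [← hlt] at this
        simp [hga, hgb, hne] at this
        exact Or.inr ⟨a, b, rfl, rfl, this.1.1, this.1.2, this.2.1, this.2.2⟩
  obtain ⟨D', hfA, hkA, hndA, hcharA⟩ := foldA_char lt d events (piA_init d)
    (piA_init_keys d)
    (by intro i
        rw [piA_init_getD d i]
        split_ifs with hi
        · refine ⟨List.nodup_singleton _, ?_, fun h => absurd hi h⟩
          intro x hx
          simp only [List.mem_singleton] at hx
          subst hx; exact hi
        · exact ⟨List.nodup_nil, by simp, fun _ => rfl⟩)
    hpre'
  obtain ⟨rs, hfB, hlenB, hmemB⟩ := foldB_char lt d events hpre'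
  simp only [hfA, hfB]
  -- A's counting pass
  set os0 : List Int := (PySem.List.pyRange 0 d 1).map (fun _ => 0) with hos0
  have hos0len : os0.length = d.toNat := by
    rw [hos0]; simp [PySem.List.length_pyRange_one]
  have hhyp : ∀ i ∈ PySem.List.pyRange 0 d 1, ∃ s, D'.get? i = some s ∧ s.Nodup ∧
      ∀ x ∈ s, 0 ≤ x ∧ x.toNat < os0.length := by
    intro i hi
    have hc : D'.contains i = true := by
      rw [PySem.Dict.contains_iff_mem_keys, hkA]; exact hi
    cases hx : D'.get? i with
    | none =>
      rw [PySem.Dict.get?_eq_none_iff_contains] at hx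
      rw [hx] at hc; cases hc
    | some s =>
      have hgd : D'.getD i [] = s := PySem.Dict.getD_of_get?_eq_some _ _ hx
      refine ⟨s, rfl, by rw [← hgd]; exact hndA i, ?_⟩
      intro x hxx
      rw [← hgd] at hxx
      obtain ⟨j, _, hj⟩ := (hcharA i x).mp hxx
      rw [piA_init_getD d j] at hj
      by_cases hjr : 0 ≤ j ∧ j < d
      · rw [if_pos hjr] at hj
        simp only [List.mem_singleton] at hj
        subst hj
        rw [hos0len]; omega
      · rw [if_neg hjr] at hj; cases hj
  obtain ⟨os', hfC, hlenC, hpC⟩ := outerA D' (PySem.List.pyRange 0 d 1) os0 hhyp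
  unfold piA_count
  rw [hfC, Option.getD_some]
  -- compare entrywise
  apply List.ext_getElem
  · rw [hlenC, hos0len, List.length_map, hlenB]
  · intro p h1 h2
    have hpl : p < os0.length := by omega
    have hplB : p < rs.length := by rw [hlenB]; omega
    have hos0p : os0[p]! = 0 := by
      rw [hos0, List.getElem!_eq_getElem?_getD, List.getElem?_map]
      rw [List.getElem?_eq_getElem (by rw [PySem.List.length_pyRange_one]; omega :
        p < (PySem.List.pyRange 0 d 1).length)]
      rfl
    have hlhs : os'[p] = os'[p]! := by
      simp [List.getElem!_eq_getElem?_getD, List.getElem?_eq_getElem h1]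
    rw [hlhs, hpC p hpl, hos0p, zero_add]
    have hrhs : (rs.map (fun r => PySem.Set.len r))[p] = PySem.Set.len rs[p]! := by
      rw [List.getElem_map]
      congr 1
      simp [List.getElem!_eq_getElem?_getD, List.getElem?_eq_getElem hplB]
    rw [hrhs]
    obtain ⟨hndp, hbdp, hrrp⟩ := hmemB p hplB
    -- countP over range of membership in row p of A = length of B's row p
    have hcong : (PySem.List.pyRange 0 d 1).countP (fun i => decide ((p : Int) ∈ D'.getD i []))
        = (PySem.List.pyRange 0 d 1).countP (fun i => decide (i ∈ rs[p]!)) := by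
      apply List.countP_congr
      intro i hi
      rw [PySem.List.mem_pyRange_one] at hi
      simp only [decide_eq_true_eq]
      rw [hcharA i (p : Int), hrrp i]
      constructor
      · rintro ⟨j, hj, hjm⟩
        rw [piA_init_getD d j] at hjm
        by_cases hjr : 0 ≤ j ∧ j < d
        · rw [if_pos hjr] at hjm
          simp only [List.mem_singleton] at hjm
          subst hjm
          exact hj
        · rw [if_neg hjr] at hjm; cases hjm
      · intro h
        refine ⟨(p : Int), h, ?_⟩
        rw [piA_init_getD d (p : Int), if_pos (by constructor <;> [positivity; omega])]
        simp
    rw [hcong, count_mem_pyRange rs[p]! d hndp hbdp]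
    rfl
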